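-- pv_equiv track=rewrite | github.com/Sasha-VAV/Algorithms | PythonSolutions/Leetcode/L3548.py | find_horizontal_cut
-- ===== SOURCE A (Python) =====
-- from collections import defaultdict
--
-- def find_horizontal_cut(grid: list[list[int]], total: int) -> bool:
--     n = len(grid)
--     m = len(grid[0])
--     curr = 0
--     unique_values = defaultdict(list)
--     if n < 2:
--         return False
--     for i, row in enumerate(grid):
--         for j, x in enumerate(row):
--             unique_values[x].append((i, j))
--             curr += x
--         diff = 2 * curr - total
--         if diff < 0:
--             continue
--         if diff == 0:
--             return True
--         for x, y in unique_values[diff]: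
--             if i == 0 and 0 < y < m - 1: continue
--             if m == 1 and 0 < x < i: continue
--             return True
--     return False
-- ===== SOURCE B (Python) =====
-- def find_horizontal_cut(grid: list[list[int]], total: int) -> bool:
--     if len(grid) < 2:
--         return False
--     m = len(grid[0])
--     pref = []
--     s = 0
--     for row in grid:
--         s += sum(row)
--         pref.append(s)
--     diffs = [2 * p - total for p in pref]
--     if 0 in diffs:
--         return True
--     return any(
--         v == d
--         for i, d in enumerate(diffs)
--         if d > 0
--         for x, row in enumerate(grid[: i + 1])
--         for y, v in enumerate(row)
--         if not (i == 0 and 0 < y < m - 1) and not (m == 1 and 0 < x < i)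
--     )
-- ===== Notes on version B (the rewrite author's own statement) =====
-- stated objective: alternative
-- what changed: B drops A's early-returning loop with a value->positions defaultdict and instead computes the list of row prefix sums in a first pass, then answers with a pure existential: True if any diff is 0, else a single any() comprehension over (i, prior cell) pairs testing cell == diff with the same two skip conditions; correct because A's result is exactly that disjunction over i.
import Mathlib
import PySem

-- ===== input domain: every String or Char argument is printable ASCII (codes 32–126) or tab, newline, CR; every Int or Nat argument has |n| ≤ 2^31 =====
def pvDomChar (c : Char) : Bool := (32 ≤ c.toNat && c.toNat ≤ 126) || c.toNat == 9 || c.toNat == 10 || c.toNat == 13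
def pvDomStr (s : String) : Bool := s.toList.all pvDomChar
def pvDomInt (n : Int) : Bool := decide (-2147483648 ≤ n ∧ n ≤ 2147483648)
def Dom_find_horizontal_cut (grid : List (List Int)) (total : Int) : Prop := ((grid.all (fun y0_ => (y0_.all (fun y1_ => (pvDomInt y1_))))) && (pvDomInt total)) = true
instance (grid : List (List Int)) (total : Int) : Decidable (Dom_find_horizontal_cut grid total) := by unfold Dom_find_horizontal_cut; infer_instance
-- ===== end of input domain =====

-- B replaces A's early-returning loop with a value→positions defaultdict by two staged passes: a prefix-sum
-- list built first, then one pure existential (any) over indices and prior cells; return value only, no mutation.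

-- ===== PORT A =====

-- inner 'for x, y in unique_values[diff]' loop: True on first non-skipped position
def pvInnerA (i m : Int) : List (Int × Int) → Bool
  | [] => false
  | (x, y) :: rest =>
    if i = 0 ∧ 0 < y ∧ y < m - 1 then pvInnerA i m rest
    else if m = 1 ∧ 0 < x ∧ x < i then pvInnerA i m rest
    else true

-- 'for j, x in enumerate(row): unique_values[x].append((i, j)); curr += x'
def pvRowA (i : Int) : List (Int × Int) → PySem.Dict Int (List (Int × Int)) → Int →
    PySem.Dict Int (List (Int × Int)) × Int
  | [], d, curr => (d, curr)
  | (j, x) :: rest, d, curr => pvRowA i rest (d.insert x (d.getD x [] ++ [(i, j)])) (curr + x)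

-- outer 'for i, row in enumerate(grid)' loop
def pvLoopA (total m : Int) : List (Int × List Int) → PySem.Dict Int (List (Int × Int)) → Int → Bool
  | [], _, _ => false
  | (i, row) :: rest, d, curr =>
    let s := pvRowA i (PySem.List.enumerate row) d curr
    let diff := 2 * s.2 - total
    if diff < 0 then pvLoopA total m rest s.1 s.2
    else if diff = 0 then true
    else if pvInnerA i m (s.1.getD diff []) then true
    else pvLoopA total m rest s.1 s.2

def find_horizontal_cut (grid : List (List Int)) (total : Int) : Bool :=
  -- n = len(grid), m = len(grid[0]); Python raises IndexError on [], excluded by Pre_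
  if (grid.length : Int) < 2 then false
  else pvLoopA total ((grid.headD []).length : Int) (PySem.List.enumerate grid) PySem.Dict.empty 0

-- ===== PORT B =====

-- 'pref = []; s = 0; for row in grid: s += sum(row); pref.append(s)'
def pvPrefB : List (List Int) → Int → List Int → List Int
  | [], _, pref => pref
  | row :: rest, s, pref => pvPrefB rest (s + row.sum) (pref ++ [s + row.sum])

-- the final 'any(...)' comprehension; the '0 in diffs' test is List.contains
def find_horizontal_cut_alt (grid : List (List Int)) (total : Int) : Bool :=
  if (grid.length : Int) < 2 then false
  else
    let m : Int := ((grid.headD []).length : Int)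
    let diffs : List Int := (pvPrefB grid 0 []).map (fun p => 2 * p - total)
    if diffs.contains 0 then true
    else
      (PySem.List.enumerate diffs).any fun idp =>
        decide (0 < idp.2) &&
        ((PySem.List.enumerate (PySem.List.slice grid none (some (idp.1 + 1)))).any fun xr =>
          (PySem.List.enumerate xr.2).any fun yv =>
            (yv.2 == idp.2) &&
            !(decide (idp.1 = 0 ∧ 0 < yv.1 ∧ yv.1 < m - 1)) &&
            !(decide (m = 1 ∧ 0 < xr.1 ∧ xr.1 < idp.1)))

-- ===== PRECONDITION & SPEC =====
-- Pre_ excludes only the empty grid, on which Python A raises IndexError (len(grid[0])).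
def Pre_find_horizontal_cut (grid : List (List Int)) (total : Int) : Prop := grid ≠ []
instance (grid : List (List Int)) (total : Int) : Decidable (Pre_find_horizontal_cut grid total) := by
  unfold Pre_find_horizontal_cut; infer_instance

def pvWitness_find_horizontal_cut : List (List Int) × Int := ([[1, 2], [3, 0]], 6)

def Spec_find_horizontal_cut (grid : List (List Int)) (total : Int) (out : Bool) : Prop := out = find_horizontal_cut_alt grid total
instance (grid : List (List Int)) (total : Int) (out : Bool) : Decidable (Spec_find_horizontal_cut grid total out) := by unfold Spec_find_horizontal_cut; infer_instance

-- ===== CLAIM (what is proved, stated in full; the proofs are below) =====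
def Claim_equal_find_horizontal_cut : Prop := ∀ (grid : List (List Int)) (total : Int), Dom_find_horizontal_cut grid total → Pre_find_horizontal_cut grid total → Spec_find_horizontal_cut grid total (find_horizontal_cut grid total)

-- ===== LEMMAS AND PROOFS =====

-- the two skip conditions as one eligibility test
def pvOK (i m x y : Int) : Bool :=
  !(decide (i = 0 ∧ 0 < y ∧ y < m - 1)) && !(decide (m = 1 ∧ 0 < x ∧ x < i))

-- row-major positions of value v in the processed (index, row) prefix
def pvOcc (pref : List (Int × List Int)) (v : Int) : List (Int × Int) :=
  pref.flatMap fun p =>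
    (PySem.List.enumerate p.2).filterMap fun jx => if jx.2 = v then some (p.1, jx.1) else none

-- clean prefix-sum list (proof-side form of pvPrefB)
def pvPrefL : List (List Int) → Int → List Int
  | [], _ => []
  | row :: rest, s => (s + row.sum) :: pvPrefL rest (s + row.sum)

-- per-row body of A's outer loop, as a pure bool
def pvBody (total m i curr' : Int) (done' : List (Int × List Int)) : Bool :=
  ((2 * curr' - total) == 0) ||
    (decide (0 < 2 * curr' - total) && pvInnerA i m (pvOcc done' (2 * curr' - total)))

-- A's outer loop as a disjunction over rows (bridge between the two ports)
def pvAny (total m : Int) : List (Int × List Int) → List (Int × List Int) → Int → Bool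
  | [], _, _ => false
  | (i, row) :: rest, done, curr =>
    pvBody total m i (curr + row.sum) (done ++ [(i, row)]) ||
      pvAny total m rest (done ++ [(i, row)]) (curr + row.sum)

theorem pvPrefB_eq (rows : List (List Int)) : ∀ (s : Int) (acc : List Int),
    pvPrefB rows s acc = acc ++ pvPrefL rows s := by
  induction rows with
  | nil => simp [pvPrefB, pvPrefL]
  | cons r t ih => intro s acc; simp [pvPrefB, pvPrefL, ih]

theorem pvRowA_spec (i : Int) (l : List (Int × Int)) (d : PySem.Dict Int (List (Int × Int)))
    (curr : Int) :
    (pvRowA i l d curr).2 = curr + (l.map (·.2)).sum ∧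
    ∀ v, (pvRowA i l d curr).1.getD v [] =
      d.getD v [] ++ l.filterMap (fun jx => if jx.2 = v then some (i, jx.1) else none) := by
  induction l generalizing d curr with
  | nil => simp [pvRowA]
  | cons hd tl ih =>
    obtain ⟨j, x⟩ := hd
    have h := ih (d.insert x (d.getD x [] ++ [(i, j)])) (curr + x)
    refine ⟨?_, ?_⟩
    · simp [pvRowA, h.1]; ring
    · intro v
      rw [pvRowA, h.2 v, PySem.Dict.getD_insert]
      by_cases hv : x = v
      · simp [hv]
      · simp [hv, Ne.symm hv]

theorem pvInnerA_eq_any (i m : Int) (l : List (Int × Int)) :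
    pvInnerA i m l = l.any fun p => pvOK i m p.1 p.2 := by
  induction l with
  | nil => simp [pvInnerA]
  | cons hd tl ih =>
    obtain ⟨x, y⟩ := hd
    simp only [pvInnerA, List.any_cons]
    split_ifs with h1 h2
    · have hx : pvOK i m x y = false := by simp [pvOK, h1]
      simp [hx, ih]
    · have hx : pvOK i m x y = false := by simp [pvOK, h2]
      simp [hx, ih]
    · have hx : pvOK i m x y = true := by simp [pvOK, h1, h2]
      simp [hx]

theorem pvOcc_append (a b : List (Int × List Int)) (v : Int) :
    pvOcc (a ++ b) v = pvOcc a v ++ pvOcc b v := by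
  simp [pvOcc]

-- A's loop equals the bridge disjunction, given the dict invariant
theorem pvLoopA_eq_pvAny (total m : Int) (pending : List (Int × List Int)) :
    ∀ (done : List (Int × List Int)) (d : PySem.Dict Int (List (Int × Int))) (curr : Int),
    (∀ v, d.getD v [] = pvOcc done v) →
    pvLoopA total m pending d curr = pvAny total m pending done curr := by
  induction pending with
  | nil => intro done d curr _; simp [pvLoopA, pvAny]
  | cons hd tl ih =>
    intro done d curr hinv
    obtain ⟨i, row⟩ := hd
    have hrow := pvRowA_spec i (PySem.List.enumerate row) d curr
    have hsum : (pvRowA i (PySem.List.enumerate row) d curr).2 = curr + row.sum := by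
      rw [hrow.1, PySem.List.map_snd_enumerate]
    have hinv' : ∀ v, (pvRowA i (PySem.List.enumerate row) d curr).1.getD v [] =
        pvOcc (done ++ [(i, row)]) v := by
      intro v
      rw [hrow.2 v, hinv v, pvOcc_append]
      simp [pvOcc]
    simp only [pvLoopA, pvAny, hsum]
    rw [hinv', ih _ _ _ hinv']
    set diff := 2 * (curr + row.sum) - total with hdiff
    by_cases h0 : diff < 0
    · have hb : pvBody total m i (curr + row.sum) (done ++ [(i, row)]) = false := by
        simp only [pvBody, ← hdiff]
        simp [show ¬ diff = 0 by omega, show ¬ 0 < diff by omega]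
      simp [h0, hb]
    · by_cases h1 : diff = 0
      · have hb : pvBody total m i (curr + row.sum) (done ++ [(i, row)]) = true := by
          simp only [pvBody, ← hdiff]; simp [h1]
        simp [h1, hb]
      · have hb : pvBody total m i (curr + row.sum) (done ++ [(i, row)]) =
            pvInnerA i m (pvOcc (done ++ [(i, row)]) diff) := by
          simp only [pvBody, ← hdiff]
          simp [h1, show 0 < diff by omega]
        rw [hb]
        by_cases h2 : pvInnerA i m (pvOcc (done ++ [(i, row)]) diff) = true
        · simp [h0, h1, h2]
        · simp only [Bool.not_eq_true] at h2
          simp [h0, h1, h2]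

-- one row of B's inner scan equals A's scan of that row's filtered occurrences
theorem pvScanRow_eq (i m x diff : Int) (l : List (Int × Int)) :
    (l.any fun yv => (yv.2 == diff) && !(decide (i = 0 ∧ 0 < yv.1 ∧ yv.1 < m - 1)) &&
        !(decide (m = 1 ∧ 0 < x ∧ x < i))) =
      (l.filterMap fun jx => if jx.2 = diff then some (x, jx.1) else none).any
        fun p => pvOK i m p.1 p.2 := by
  induction l with
  | nil => simp
  | cons jx t ih =>
    rw [List.any_cons, List.filterMap_cons, ih]
    by_cases hv : jx.2 = diff
    · rw [if_pos hv, List.any_cons]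
      have hh : (jx.2 == diff && !decide (i = 0 ∧ 0 < jx.1 ∧ jx.1 < m - 1) &&
          !decide (m = 1 ∧ 0 < x ∧ x < i)) = pvOK i m x jx.1 := by
        simp [pvOK, hv]
      rw [hh]
    · rw [if_neg hv]
      have hh : (jx.2 == diff && !decide (i = 0 ∧ 0 < jx.1 ∧ jx.1 < m - 1) &&
          !decide (m = 1 ∧ 0 < x ∧ x < i)) = false := by
        simp [hv]
      rw [hh, Bool.false_or]

-- B's inner double scan of an (index, row) list equals A's scan of the occurrence list
theorem pvScan_eq_pvInnerA (dn : List (Int × List Int)) (i m diff : Int) :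
    (dn.any fun xr => (PySem.List.enumerate xr.2).any fun yv =>
        (yv.2 == diff) && !(decide (i = 0 ∧ 0 < yv.1 ∧ yv.1 < m - 1)) &&
        !(decide (m = 1 ∧ 0 < xr.1 ∧ xr.1 < i))) =
      pvInnerA i m (pvOcc dn diff) := by
  rw [pvInnerA_eq_any, pvOcc, List.any_flatMap]
  exact List.any_congr rfl fun p => pvScanRow_eq i m p.1 diff (PySem.List.enumerate p.2)

-- the boolean `any` of a pointwise disjunction splits
theorem pvAny_or {α : Type} (l : List α) (p q : α → Bool) :
    (l.any fun x => p x || q x) = (l.any p || l.any q) := by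
  induction l with
  | nil => simp
  | cons h t ih =>
    simp only [List.any_cons, ih]
    cases p h <;> cases q h <;> cases t.any p <;> cases t.any q <;> simp

-- main B-side lemma: the enumerated diffs disjunction equals the bridge, row by row
theorem pvEnum_eq_pvAny (total m : Int) :
    ∀ (rows pre : List (List Int)) (s : Int),
    ((PySem.List.enumerate ((pvPrefL rows s).map (fun p => 2 * p - total)) (pre.length : Int)).any
      fun idp => (idp.2 == 0) ||
        (decide (0 < idp.2) &&
          ((PySem.List.enumerate (PySem.List.slice (pre ++ rows) none (some (idp.1 + 1)))).any fun xr =>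
            (PySem.List.enumerate xr.2).any fun yv =>
              (yv.2 == idp.2) &&
              !(decide (idp.1 = 0 ∧ 0 < yv.1 ∧ yv.1 < m - 1)) &&
              !(decide (m = 1 ∧ 0 < xr.1 ∧ xr.1 < idp.1))))) =
    pvAny total m (PySem.List.enumerate rows (pre.length : Int)) (PySem.List.enumerate pre 0) s := by
  intro rows
  induction rows with
  | nil => intro pre s; simp [pvPrefL, pvAny, PySem.List.enumerate_nil]
  | cons row rest ih =>
    intro pre s
    have hk : ((pre.length : Int) + 1) = (((pre ++ [row]).length : Nat) : Int) := by
      simp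
    have hslice : PySem.List.slice (pre ++ row :: rest) none (some ((pre.length : Int) + 1)) =
        pre ++ [row] := by
      rw [hk, PySem.List.slice_to_natCast]
      simp [List.take_append]
    have hdone : PySem.List.enumerate pre 0 ++ [((pre.length : Int), row)] =
        PySem.List.enumerate (pre ++ [row]) 0 := by
      rw [PySem.List.enumerate_append]
      simp [PySem.List.enumerate_cons, PySem.List.enumerate_nil]
    simp only [pvPrefL, List.map_cons, PySem.List.enumerate_cons, List.any_cons, pvAny]
    rw [hslice]
    have hhead : (((2 * (s + row.sum) - total : Int) == 0) ||
        (decide (0 < 2 * (s + row.sum) - total) &&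
          ((PySem.List.enumerate (pre ++ [row])).any fun xr =>
            (PySem.List.enumerate xr.2).any fun yv =>
              (yv.2 == (2 * (s + row.sum) - total)) &&
              !(decide ((pre.length : Int) = 0 ∧ 0 < yv.1 ∧ yv.1 < m - 1)) &&
              !(decide (m = 1 ∧ 0 < xr.1 ∧ xr.1 < (pre.length : Int)))))) =
        pvBody total m (pre.length : Int) (s + row.sum)
          (PySem.List.enumerate pre 0 ++ [((pre.length : Int), row)]) := by
      rw [hdone, pvBody, pvScan_eq_pvInnerA]
    rw [hhead]
    have htail := ih (pre ++ [row]) (s + row.sum)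
    rw [← hk] at htail
    simp only [List.append_assoc, List.cons_append, List.nil_append] at htail
    rw [htail, hdone]

theorem pvEnum_contains_zero (l : List Int) : ∀ s : Int,
    ((PySem.List.enumerate l s).any fun idp => idp.2 == 0) = l.contains 0 := by
  induction l with
  | nil => intro s; simp [PySem.List.enumerate_nil]
  | cons a t ih =>
    intro s
    simp only [PySem.List.enumerate_cons, List.any_cons, ih, List.contains_cons]
    rw [Bool.beq_comm]

theorem find_horizontal_cut_eq (grid : List (List Int)) (total : Int) :
    find_horizontal_cut grid total = find_horizontal_cut_alt grid total := by
  unfold find_horizontal_cut find_horizontal_cut_alt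
  dsimp only
  by_cases h : (grid.length : Int) < 2
  · rw [if_pos h, if_pos h]
  · rw [if_neg h, if_neg h]
    rw [pvLoopA_eq_pvAny total ((grid.headD []).length : Int) (PySem.List.enumerate grid) []
      PySem.Dict.empty 0 (by intro v; simp [pvOcc, PySem.Dict.getD])]
    rw [pvPrefB_eq, List.nil_append]
    set m : Int := ((grid.headD []).length : Int)
    set diffs : List Int := (pvPrefL grid 0).map (fun p => 2 * p - total) with hdiffs
    have hmain := pvEnum_eq_pvAny total m grid [] 0
    simp only [List.length_nil, Nat.cast_zero, List.nil_append, PySem.List.enumerate_nil,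
      ← hdiffs] at hmain
    rw [← hmain, pvAny_or]
    rw [pvEnum_contains_zero]
    cases hc : diffs.contains 0 with
    | true => simp
    | false => simp only [Bool.false_or, Bool.false_eq_true, if_false]

-- ===== VERDICT (by name: the statement is the Claim_ definition above) =====
theorem find_horizontal_cut_spec : Claim_equal_find_horizontal_cut := by
  intro grid total _ _
  unfold Spec_find_horizontal_cut
  exact find_horizontal_cut_eq grid total
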